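-- pv_equiv track=rewrite | github.com/GenPol/1C | RECAPP.py | split_list_by_negative
-- ===== SOURCE A (Python) =====
-- def split_list_by_negative(numbers):
--     result = []
--     current_sublist = []
--
--     for num in numbers:
--         if num < 0:
--             # Отрицательное число, заканчиваем текущий подсписок и начинаем новый
--             current_sublist.append(num)
--             result.append(current_sublist)
--             current_sublist = []
--         else:
--             # Вне зависимости от знака, добавляем число к текущему подсписку
--             current_sublist.append(num)
--
--     # Добавляем последний подсписок, если он не пустой
--     if current_sublist:
--         result.append(current_sublist)
--
--     return result
-- ===== SOURCE B (Python) =====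
-- def split_list_by_negative(numbers):
--     result = []
--     start = 0
--     for i, num in enumerate(numbers):
--         if num < 0:
--             result.append(numbers[start:i + 1])
--             start = i + 1
--     tail = numbers[start:]
--     if tail:
--         result.append(tail)
--     return result
-- ===== Notes on version B (the rewrite author's own statement) =====
-- stated objective: alternative
-- what changed: B keeps only a running start index and emits each sublist as a slice numbers[start:i+1] at each negative (plus the final tail slice), instead of A's element-by-element append into a current_sublist accumulator.
import Mathlib
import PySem

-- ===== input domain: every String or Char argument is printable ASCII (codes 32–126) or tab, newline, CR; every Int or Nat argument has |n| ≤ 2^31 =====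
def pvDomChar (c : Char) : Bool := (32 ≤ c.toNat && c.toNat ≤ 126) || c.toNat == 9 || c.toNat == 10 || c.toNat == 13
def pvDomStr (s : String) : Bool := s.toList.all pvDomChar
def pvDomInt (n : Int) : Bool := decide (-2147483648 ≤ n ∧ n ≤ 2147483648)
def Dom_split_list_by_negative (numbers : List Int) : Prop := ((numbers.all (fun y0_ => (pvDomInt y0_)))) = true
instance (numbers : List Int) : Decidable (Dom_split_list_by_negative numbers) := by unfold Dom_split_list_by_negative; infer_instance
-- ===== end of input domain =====

-- B replaces A's element-by-element current_sublist accumulator with a running start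
-- index and boundary slices; same O(n) cost, different decomposition (objective: alternative).

-- ===== PORT A =====
-- for num in numbers: grow current_sublist; close it after each negative; flush at the end
def split_list_by_negative (numbers : List Int) : List (List Int) :=
  let st := numbers.foldl
    (fun (s : List (List Int) × List Int) num =>
      if num < 0 then (s.1 ++ [s.2 ++ [num]], ([] : List Int))
      else (s.1, s.2 ++ [num]))
    ([], [])
  if st.2.isEmpty then st.1 else st.1 ++ [st.2]

-- ===== PORT B =====
-- for i, num in enumerate(numbers): at each negative append numbers[start:i+1], start = i+1;
-- finally append numbers[start:] if non-empty
def split_list_by_negative_alt (numbers : List Int) : List (List Int) :=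
  let st := (PySem.List.enumerate numbers).foldl
    (fun (s : List (List Int) × Int) p =>
      if p.2 < 0 then
        (s.1 ++ [PySem.List.slice numbers (some s.2) (some (p.1 + 1))], p.1 + 1)
      else s)
    ([], 0)
  let tail := PySem.List.slice numbers (some st.2) none
  if tail.isEmpty then st.1 else st.1 ++ [tail]

-- ===== PRECONDITION & SPEC =====
def Spec_split_list_by_negative (numbers : List Int) (out : List (List Int)) : Prop := out = split_list_by_negative_alt numbers
instance (numbers : List Int) (out : List (List Int)) : Decidable (Spec_split_list_by_negative numbers out) := by unfold Spec_split_list_by_negative; infer_instance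

-- ===== CLAIM (what is proved, stated in full; the proofs are below) =====
def Claim_equal_split_list_by_negative : Prop := ∀ (numbers : List Int), Dom_split_list_by_negative numbers → Spec_split_list_by_negative numbers (split_list_by_negative numbers)

-- ===== LEMMAS AND PROOFS =====

-- One induction over the unprocessed suffix relates A's state (res, current_sublist)
-- to B's state (res, start): current_sublist = (full.drop s).take (j - s).
theorem pv_loop_eq (full : List Int) :
    ∀ (t : List Int) (j s : Nat) (res : List (List Int)),
      full.drop j = t → s ≤ j → j ≤ full.length →
      (let stA := t.foldl
          (fun (st : List (List Int) × List Int) num =>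
            if num < 0 then (st.1 ++ [st.2 ++ [num]], ([] : List Int))
            else (st.1, st.2 ++ [num]))
          (res, (full.drop s).take (j - s))
       if stA.2.isEmpty then stA.1 else stA.1 ++ [stA.2])
      =
      (let stB := (PySem.List.enumerate t (j : Int)).foldl
          (fun (st : List (List Int) × Int) p =>
            if p.2 < 0 then
              (st.1 ++ [PySem.List.slice full (some st.2) (some (p.1 + 1))], p.1 + 1)
            else st)
          (res, (s : Int))
       let tail := PySem.List.slice full (some stB.2) none
       if tail.isEmpty then stB.1 else stB.1 ++ [tail]) := by
  intro t
  induction t with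
  | nil =>
    intro j s res hdrop hsj hj
    simp only [List.foldl_nil, PySem.List.enumerate_nil]
    have hlen : full.length ≤ j := by
      have := congrArg List.length hdrop
      simp [List.length_drop] at this
      omega
    have htake : (full.drop s).take (j - s) = full.drop s := by
      apply List.take_of_length_le
      simp [List.length_drop]; omega
    rw [htake, PySem.List.slice_from_natCast]
  | cons x t ih =>
    intro j s res hdrop hsj hj
    have hjlt : j < full.length := by
      by_contra h
      have : full.drop j = [] := List.drop_eq_nil_of_le (by omega)
      rw [this] at hdrop; simp at hdrop
    have hx? : full[j]? = some x := by
      have h0 : (full.drop j)[0]? = some x := by rw [hdrop]; rfl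
      simpa [List.getElem?_drop] using h0
    have hdrop' : full.drop (j + 1) = t := by
      have : full.drop (j + 1) = (full.drop j).drop 1 := by
        rw [List.drop_drop]
      rw [this, hdrop]; rfl
    -- growing the slice by one element
    have hgrow : (full.drop s).take (j - s) ++ [x] = (full.drop s).take (j + 1 - s) := by
      have h1 : j + 1 - s = (j - s) + 1 := by omega
      rw [h1, List.take_add_one]
      have : (full.drop s)[j - s]? = some x := by
        rw [List.getElem?_drop]
        have h2 : s + (j - s) = j := by omega
        rw [h2, hx?]
      simp [this]
    simp only [PySem.List.enumerate_cons, List.foldl_cons]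
    by_cases hneg : x < 0
    · simp only [if_pos hneg]
      have hslice : PySem.List.slice full (some (s : Int)) (some ((j : Int) + 1))
          = (full.drop s).take (j - s) ++ [x] := by
        have : ((j : Int) + 1) = ((j + 1 : Nat) : Int) := by push_cast; ring
        rw [this, PySem.List.slice_natCast, hgrow]
      have hnext : ((j : Int) + 1) = ((j + 1 : Nat) : Int) := by push_cast; ring
      rw [hslice, hnext]
      have := ih (j + 1) (j + 1) (res ++ [(full.drop s).take (j - s) ++ [x]])
        hdrop' (le_refl _) (by omega)
      simpa using this
    · simp only [if_neg hneg]
      have hnext : ((j : Int) + 1) = ((j + 1 : Nat) : Int) := by push_cast; ring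
      rw [hnext]
      have := ih (j + 1) s res hdrop' (by omega) (by omega)
      rw [← hgrow] at this
      simpa using this

-- ===== VERDICT (by name: the statement is the Claim_ definition above) =====
theorem split_list_by_negative_spec : Claim_equal_split_list_by_negative := by
  intro numbers _
  unfold Spec_split_list_by_negative split_list_by_negative split_list_by_negative_alt
  have := pv_loop_eq numbers numbers 0 0 [] (by simp) (le_refl 0) (by omega)
  simpa using this
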